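-- pv_equiv track=rewrite | github.com/guytenn/Act2Vec | utils/corpus_utils.py | unbag_corpus
-- ===== SOURCE A (Python) =====
-- def unbag_corpus(corpus, window=1):
--     new_corpus = []
--     for line in corpus:
--         for i in range(window, len(line) - window):
--             words_left = ['WL-' + w for w in line[i-window: i]]
--             words_right = ['WR-' + w for w in line[i+1: i+1+window]]
--             new_corpus.append(words_left + [line[i]] + words_right)
--     return new_corpus
-- ===== SOURCE B (Python) =====
-- def unbag_corpus(corpus, window=1):
--     new_corpus = []
--     for line in corpus:
--         if 2 * window >= len(line):
--             continue  # no full context window fits in this line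
--         for ctx in zip(*(line[k:] for k in range(2 * window + 1))):
--             new_corpus.append(['WL-' + w for w in ctx[:window]]
--                               + [ctx[window]]
--                               + ['WR-' + w for w in ctx[window + 1:]])
--     return new_corpus
-- ===== Notes on version B (the rewrite author's own statement) =====
-- stated objective: alternative
-- what changed: B replaces A's index loop with slicing per center by zipping the 2*window+1 shifted copies of each line (zip(*(line[k:] ...)), Python's truncating transpose) and prefixing the two halves of each resulting tuple.
import Mathlib
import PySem

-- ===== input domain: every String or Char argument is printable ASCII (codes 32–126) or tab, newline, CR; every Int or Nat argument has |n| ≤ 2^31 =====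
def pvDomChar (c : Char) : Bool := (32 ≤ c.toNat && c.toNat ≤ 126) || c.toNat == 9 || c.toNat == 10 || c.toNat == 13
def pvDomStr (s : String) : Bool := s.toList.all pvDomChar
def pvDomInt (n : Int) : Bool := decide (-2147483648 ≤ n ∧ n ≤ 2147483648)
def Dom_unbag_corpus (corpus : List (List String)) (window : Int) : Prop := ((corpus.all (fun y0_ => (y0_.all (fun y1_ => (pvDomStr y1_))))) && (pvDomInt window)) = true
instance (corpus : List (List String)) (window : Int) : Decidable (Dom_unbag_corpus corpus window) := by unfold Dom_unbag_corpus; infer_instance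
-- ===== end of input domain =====

-- B gathers each line's context windows by zipping the 2*window+1 shifted copies of the line (Python zip(*...) truncation), then prefixes the halves of each tuple; alternative algorithm, same cost.


-- ===== PORT A =====
-- line[i] raises IndexError only when window < 0 (excluded by Pre_); inside Pre_ the pyGetD default is unreachable.
def unbag_corpus (corpus : List (List String)) (window : Int) : List (List String) :=
  corpus.foldl (fun new_corpus line =>
    (PySem.List.pyRange window ((line.length : Int) - window) 1).foldl
      (fun acc i =>
        let words_left := (PySem.List.slice line (some (i - window)) (some i)).map (fun w => "WL-" ++ w)
        let words_right := (PySem.List.slice line (some (i + 1)) (some (i + 1 + window))).map (fun w => "WR-" ++ w)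
        acc ++ [words_left ++ [PySem.List.pyGetD line i ""] ++ words_right]) new_corpus) []

-- ===== PORT B =====
-- Port of Python's variadic zip(*lists): emit the heads row while every list is nonempty, then
-- recurse on the tails; zip() of no lists is empty. Fuel = length of the first list, which is an
-- upper bound on the number of rows (rows = min length ≤ first length), so it is exact.
def zipStarAux {α : Type} : Nat → List (List α) → List (List α)
  | 0, _ => []
  | fuel + 1, ls =>
    if ls.all (fun l => !l.isEmpty) then
      ls.filterMap List.head? :: zipStarAux fuel (ls.map List.tail)
    else []

def zipStar {α : Type} (ls : List (List α)) : List (List α) :=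
  zipStarAux ((ls.headD []).length) ls

def unbag_corpus_alt (corpus : List (List String)) (window : Int) : List (List String) :=
  corpus.foldl (fun new_corpus line =>
    if 2 * window ≥ (line.length : Int) then new_corpus  -- no full context window fits in this line
    else
      let span := 2 * window + 1
      let shifted := (PySem.List.pyRange 0 span 1).map (fun k => PySem.List.slice line (some k) none)
      (zipStar shifted).foldl (fun acc ctx =>
        acc ++ [(PySem.List.slice ctx none (some window)).map (fun w => "WL-" ++ w)
          ++ [PySem.List.pyGetD ctx window ""]
          ++ (PySem.List.slice ctx (some (window + 1)) none).map (fun w => "WR-" ++ w)]) new_corpus) []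

-- ===== PRECONDITION & SPEC =====
-- Pre_ excludes exactly the inputs where A raises IndexError: a negative window with a nonempty
-- corpus makes A's inner range reach i = len(line), where line[i] is out of range.
def Pre_unbag_corpus (corpus : List (List String)) (window : Int) : Prop := 0 ≤ window ∨ corpus = []
instance (corpus : List (List String)) (window : Int) : Decidable (Pre_unbag_corpus corpus window) := by unfold Pre_unbag_corpus; infer_instance
def pvWitness_unbag_corpus : List (List String) × Int := ([["a", "b", "c"]], 1)
def Spec_unbag_corpus (corpus : List (List String)) (window : Int) (out : List (List String)) : Prop := out = unbag_corpus_alt corpus window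
instance (corpus : List (List String)) (window : Int) (out : List (List String)) : Decidable (Spec_unbag_corpus corpus window out) := by unfold Spec_unbag_corpus; infer_instance

-- ===== CLAIM (what is proved, stated in full; the proofs are below) =====
def Claim_equal_unbag_corpus : Prop := ∀ (corpus : List (List String)) (window : Int), Dom_unbag_corpus corpus window → Pre_unbag_corpus corpus window → Spec_unbag_corpus corpus window (unbag_corpus corpus window)

-- ===== LEMMAS AND PROOFS =====

-- heads of the shifted copies = the first m elements of the line
theorem heads_shifts {α : Type} (line : List α) (m : Nat) (h : m ≤ line.length) :
    ((List.range m).map (fun k => line.drop k)).filterMap List.head? = line.take m := by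
  induction m with
  | zero => simp
  | succ m ih =>
    rw [List.range_succ, List.map_append, List.filterMap_append, ih (by omega)]
    have hm : m < line.length := by omega
    rw [List.take_add_one]
    simp only [List.map_cons, List.map_nil, List.filterMap_cons, List.filterMap_nil,
      List.head?_drop, List.getElem?_eq_getElem hm, Option.toList_some]

-- tails of the shifted copies of (a :: t) = the shifted copies of t
theorem tails_shifts {α : Type} (a : α) (t : List α) (m : Nat) :
    (((List.range m).map (fun k => (a :: t).drop k)).map List.tail)
      = (List.range m).map (fun k => t.drop k) := by
  simp only [List.map_map]
  exact List.map_congr_left (fun k _ => by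
    simp [List.tail_drop, List.drop_succ_cons])

-- zip(*(line[k:] for k in range(m))) = the list of length-m windows of line, for m ≥ 1
theorem zipStarAux_shifts {α : Type} (line : List α) (m : Nat) (hm : 0 < m) :
    zipStarAux line.length ((List.range m).map (fun k => line.drop k))
      = (List.range (line.length + 1 - m)).map (fun i => (line.drop i).take m) := by
  induction line with
  | nil =>
    have : (0 : Nat) + 1 - m = 0 := by omega
    simp [zipStarAux, this]
  | cons a t ih =>
    show zipStarAux (t.length + 1) _ = _
    rw [zipStarAux]
    by_cases h : m ≤ t.length + 1
    · have hcond : ((List.range m).map (fun k => (a :: t).drop k)).all (fun l => !l.isEmpty) = true := by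
        simp only [List.all_eq_true, List.mem_map, List.mem_range]
        rintro l ⟨k, hk, rfl⟩
        simp only [Bool.not_eq_eq_eq_not, Bool.not_true, List.isEmpty_eq_false_iff,
          ne_eq, List.drop_eq_nil_iff]
        simp only [List.length_cons]
        omega
      rw [if_pos hcond, heads_shifts _ _ (by simpa using h), tails_shifts, ih]
      simp only [List.length_cons]
      have hlen : t.length + 1 + 1 - m = (t.length + 1 - m) + 1 := by omega
      rw [hlen, List.range_succ_eq_map, List.map_cons, List.map_map]
      simp [List.drop_succ_cons]
    · have hcond : ¬ ((List.range m).map (fun k => (a :: t).drop k)).all (fun l => !l.isEmpty) = true := by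
        simp only [List.all_eq_true, List.mem_map, List.mem_range, not_forall]
        refine ⟨(a :: t).drop (m - 1), ⟨m - 1, by omega, rfl⟩, ?_⟩
        have : (a :: t).drop (m - 1) = [] := by
          rw [List.drop_eq_nil_iff]
          simp only [List.length_cons]; omega
        simp [this]
      rw [if_neg hcond]
      have : t.length + 1 + 1 - m = 0 := by omega
      simp [this]

-- B's shifted table, with the Python range/slice unfolded to drops
theorem shifted_eq (line : List String) (w : Nat) :
    (PySem.List.pyRange 0 (2 * (w : Int) + 1) 1).map
        (fun k => PySem.List.slice line (some k) none)
      = (List.range (2 * w + 1)).map (fun k => line.drop k) := by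
  have h1 : (2 * (w : Int) + 1 - 0).toNat = 2 * w + 1 := by omega
  rw [PySem.List.pyRange_one, h1, List.map_map]
  exact List.map_congr_left (fun k _ => by
    have : (0 : Int) + (k : Int) = ((k : Nat) : Int) := by omega
    simp only [Function.comp, this, PySem.List.slice_from_natCast])

-- one row of B equals one row of A (indices shifted by the window)
theorem row_eq (line : List String) (w j : Nat) (_h : j + (2 * w + 1) ≤ line.length) :
    (PySem.List.slice ((line.drop j).take (2 * w + 1)) none (some (w : Int))).map (fun s => "WL-" ++ s)
      ++ [PySem.List.pyGetD ((line.drop j).take (2 * w + 1)) (w : Int) ""]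
      ++ (PySem.List.slice ((line.drop j).take (2 * w + 1)) (some ((w : Int) + 1)) none).map (fun s => "WR-" ++ s)
    = (PySem.List.slice line (some ((w : Int) + (j : Int) - (w : Int))) (some ((w : Int) + (j : Int)))).map (fun s => "WL-" ++ s)
      ++ [PySem.List.pyGetD line ((w : Int) + (j : Int)) ""]
      ++ (PySem.List.slice line (some ((w : Int) + (j : Int) + 1)) (some ((w : Int) + (j : Int) + 1 + (w : Int)))).map (fun s => "WR-" ++ s) := by
  have e1 : (w : Int) + (j : Int) - (w : Int) = ((j : Nat) : Int) := by omega
  have e2 : (w : Int) + (j : Int) = (((w + j : Nat)) : Int) := by omega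
  have e3 : (w : Int) + (j : Int) + 1 = (((w + j + 1 : Nat)) : Int) := by omega
  have e4 : (w : Int) + (j : Int) + 1 + (w : Int) = (((w + j + 1 + w : Nat)) : Int) := by omega
  have e5 : (w : Int) + 1 = (((w + 1 : Nat)) : Int) := by omega
  rw [e1, e4, e3, e2, e5,
    PySem.List.slice_natCast, PySem.List.slice_natCast,
    PySem.List.slice_to_natCast, PySem.List.slice_from_natCast,
    PySem.List.pyGetD_natCast, PySem.List.pyGetD_natCast]
  have a1 : w + j - j = w := by omega
  have a2 : w + j + 1 + w - (w + j + 1) = w := by omega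
  have a3 : min w (2 * w + 1) = w := by omega
  have a4 : 2 * w + 1 - (w + 1) = w := by omega
  have a5 : j + (w + 1) = w + j + 1 := by omega
  have hctx : ((line.drop j).take (2 * w + 1)).getD w "" = line.getD (w + j) "" := by
    rw [List.getD_eq_getElem?_getD, List.getD_eq_getElem?_getD,
      List.getElem?_take_of_lt (by omega : w < 2 * w + 1), List.getElem?_drop, Nat.add_comm j w]
  rw [List.take_take, a1, a2, a3, List.drop_take, a4, List.drop_drop, a5, hctx]

-- per-line equality of the two inner loops (A's index loop vs B's zip of shifted copies)
theorem line_eq (line : List String) (w : Nat) (acc : List (List String)) :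
    (PySem.List.pyRange (w : Int) ((line.length : Int) - (w : Int)) 1).foldl
      (fun acc i =>
        let words_left := (PySem.List.slice line (some (i - (w : Int))) (some i)).map (fun s => "WL-" ++ s)
        let words_right := (PySem.List.slice line (some (i + 1)) (some (i + 1 + (w : Int)))).map (fun s => "WR-" ++ s)
        acc ++ [words_left ++ [PySem.List.pyGetD line i ""] ++ words_right]) acc
    = (if 2 * (w : Int) ≥ (line.length : Int) then acc
      else (zipStar ((PySem.List.pyRange 0 (2 * (w : Int) + 1) 1).map
        (fun k => PySem.List.slice line (some k) none))).foldl
      (fun acc ctx =>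
        acc ++ [(PySem.List.slice ctx none (some (w : Int))).map (fun s => "WL-" ++ s)
          ++ [PySem.List.pyGetD ctx (w : Int) ""]
          ++ (PySem.List.slice ctx (some ((w : Int) + 1)) none).map (fun s => "WR-" ++ s)]) acc) := by
  by_cases hbig : 2 * (w : Int) ≥ (line.length : Int)
  · rw [if_pos hbig, PySem.List.pyRange_one_eq_nil (by omega)]
    rfl
  rw [if_neg hbig]
  rw [PySem.List.foldl_append_singleton_eq_map, PySem.List.foldl_append_singleton_eq_map]
  rw [shifted_eq]
  -- evaluate the zip of the shifted copies
  have hz : zipStar ((List.range (2 * w + 1)).map (fun k => line.drop k))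
      = (List.range (line.length + 1 - (2 * w + 1))).map (fun i => (line.drop i).take (2 * w + 1)) := by
    have hhead : (((List.range (2 * w + 1)).map (fun k => line.drop k)).headD []).length
        = line.length := by
      rw [List.range_succ_eq_map]
      simp
    unfold zipStar
    rw [hhead]
    exact zipStarAux_shifts line (2 * w + 1) (by omega)
  rw [hz]
  -- evaluate A's index range
  rw [PySem.List.pyRange_one]
  have hn : ((line.length : Int) - (w : Int) - (w : Int)).toNat = line.length + 1 - (2 * w + 1) := by
    omega
  rw [hn, List.map_map, List.map_map]
  congr 1
  refine List.map_congr_left (fun j hj => ?_)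
  have hjlt : j < line.length + 1 - (2 * w + 1) := List.mem_range.mp hj
  exact (row_eq line w j (by omega)).symm

-- the whole fold, line by line
theorem fold_eq (corpus : List (List String)) (w : Nat) (acc : List (List String)) :
    corpus.foldl (fun new_corpus line =>
      (PySem.List.pyRange (w : Int) ((line.length : Int) - (w : Int)) 1).foldl
        (fun acc i =>
          let words_left := (PySem.List.slice line (some (i - (w : Int))) (some i)).map (fun s => "WL-" ++ s)
          let words_right := (PySem.List.slice line (some (i + 1)) (some (i + 1 + (w : Int)))).map (fun s => "WR-" ++ s)
          acc ++ [words_left ++ [PySem.List.pyGetD line i ""] ++ words_right]) new_corpus) acc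
    = corpus.foldl (fun new_corpus line =>
      if 2 * (w : Int) ≥ (line.length : Int) then new_corpus
      else
        let span := 2 * (w : Int) + 1
        let shifted := (PySem.List.pyRange 0 span 1).map (fun k => PySem.List.slice line (some k) none)
        (zipStar shifted).foldl (fun acc ctx =>
          acc ++ [(PySem.List.slice ctx none (some (w : Int))).map (fun s => "WL-" ++ s)
            ++ [PySem.List.pyGetD ctx (w : Int) ""]
            ++ (PySem.List.slice ctx (some ((w : Int) + 1)) none).map (fun s => "WR-" ++ s)]) new_corpus) acc := by
  induction corpus generalizing acc with
  | nil => rfl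
  | cons line rest ih =>
    simp only [List.foldl_cons]
    rw [line_eq, ih]

-- ===== VERDICT (by name: the statements are the Claim_ definitions above) =====
theorem unbag_corpus_spec : Claim_equal_unbag_corpus := by
  intro corpus window _ hpre
  unfold Spec_unbag_corpus unbag_corpus unbag_corpus_alt
  rcases hpre with hw | hnil
  · obtain ⟨w, rfl⟩ : ∃ w : Nat, window = (w : Int) := ⟨window.toNat, by omega⟩
    exact fold_eq corpus w []
  · subst hnil; rfl
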